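-- pv_equiv track=rewrite | github.com/ilyes-smaouii/advent_of_code_2024 | scripts/day_09.py | find_leftmost_empty_range
-- ===== SOURCE A (Python) =====
-- POINT_REP = -1
--
-- NO_VAL_EMPTY_RANGE = (-1, -1)
--
-- def find_leftmost_empty_range(blocks_rep, min_range_size = 1) :
--   """
--   Find leftmost range of at least min_range_size in blocks_rep
--   """
--   range_size = 0
--   for i in range(len(blocks_rep)) :
--     if blocks_rep[i] == POINT_REP :
--       range_size += 1
--     else :
--       range_size = 0
--     if range_size >= min_range_size :
--       return (i + 1 - range_size, i + 1)
--   return NO_VAL_EMPTY_RANGE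
-- ===== SOURCE B (Python) =====
-- POINT_REP = -1
--
-- NO_VAL_EMPTY_RANGE = (-1, -1)
--
-- def find_leftmost_empty_range(blocks_rep, min_range_size = 1):
--   """
--   Find leftmost range of at least min_range_size in blocks_rep,
--   by encoding occupancy as a string and delegating to substring search.
--   """
--   if min_range_size > len(blocks_rep):
--     return NO_VAL_EMPTY_RANGE
--   mask = ''.join('E' if b == POINT_REP else 'F' for b in blocks_rep)
--   start = mask.find('E' * min_range_size)
--   if start == -1:
--     return NO_VAL_EMPTY_RANGE
--   return (start, start + min_range_size)
-- ===== Notes on version B (the rewrite author's own statement) =====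
-- stated objective: alternative
-- what changed: Reformulates the search as pattern matching: encode each block as one character ('E' for empty), then locate the leftmost run with a single str.find of 'E'*min_range_size (after an early return when min_range_size exceeds the list length), instead of scanning with a running counter and early return.
-- outside the precondition, e.g. on find_leftmost_empty_range([5], 0): A returns (1, 1), B returns (0, 0); on find_leftmost_empty_range([], 0): A returns (-1, -1), B returns (0, 0)
import Mathlib
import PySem

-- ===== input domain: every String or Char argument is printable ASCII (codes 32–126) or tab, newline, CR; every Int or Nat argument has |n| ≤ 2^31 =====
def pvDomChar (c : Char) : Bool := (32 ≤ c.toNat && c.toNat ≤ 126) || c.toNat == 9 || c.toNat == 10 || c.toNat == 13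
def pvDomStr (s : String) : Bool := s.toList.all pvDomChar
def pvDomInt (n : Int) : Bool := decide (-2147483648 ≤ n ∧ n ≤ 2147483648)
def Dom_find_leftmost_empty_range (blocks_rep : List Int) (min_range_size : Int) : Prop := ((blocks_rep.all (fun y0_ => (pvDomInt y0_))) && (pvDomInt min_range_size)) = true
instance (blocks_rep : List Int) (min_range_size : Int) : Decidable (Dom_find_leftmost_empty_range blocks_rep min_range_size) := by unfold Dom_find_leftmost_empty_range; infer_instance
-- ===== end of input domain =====

-- B recasts the task as substring search: a one-character-per-block occupancy string and
-- one str.find of 'E'*min_range_size replace A's running counter; proved equal for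
-- min_range_size ≥ 1 (see Pre_ below).

-- ===== PORT A =====
-- index loop with running counter and early return, as recursion carrying i and range_size
def findLoopA : List Int → Int → Int → Int → Int × Int
  | [], _, _, _ => (-1, -1)
  | x :: xs, m, i, rs =>
    let rs' := if x = -1 then rs + 1 else 0
    if m ≤ rs' then (i + 1 - rs', i + 1)
    else findLoopA xs m (i + 1) rs'

def find_leftmost_empty_range (blocks_rep : List Int) (min_range_size : Int) : Int × Int :=
  findLoopA blocks_rep min_range_size 0 0

-- ===== PORT B =====
-- early return if min_range_size > len(blocks_rep) (no run can exceed the list);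
-- mask = ''.join('E' if b == POINT_REP else 'F' …); start = mask.find('E' * min_range_size)
-- ('E' * k is '' for k ≤ 0 in Python, hence the .toNat clamp)
def find_leftmost_empty_range_alt (blocks_rep : List Int) (min_range_size : Int) : Int × Int :=
  if (blocks_rep.length : Int) < min_range_size then (-1, -1) else
  let mask : String := String.ofList (blocks_rep.map (fun b => if b = -1 then 'E' else 'F'))
  let pattern : String := String.ofList (List.replicate min_range_size.toNat 'E')
  let start := PySem.Str.find mask pattern
  if start = -1 then (-1, -1) else (start, start + min_range_size)

-- ===== PRECONDITION & SPEC =====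
-- Pre_ excludes the degenerate requests min_range_size ≤ 0 (a run of non-positive
-- length is asked for): every position trivially qualifies, no particular window is
-- specified, and A and B return different but equally defensible placeholder windows
-- there (see the cited examples).
def Pre_find_leftmost_empty_range (blocks_rep : List Int) (min_range_size : Int) : Prop :=
  1 ≤ min_range_size
instance (blocks_rep : List Int) (min_range_size : Int) : Decidable (Pre_find_leftmost_empty_range blocks_rep min_range_size) := by unfold Pre_find_leftmost_empty_range; infer_instance

def pvWitness_find_leftmost_empty_range : List Int × Int := ([-1, 2, -1, -1], 2)

def Spec_find_leftmost_empty_range (blocks_rep : List Int) (min_range_size : Int) (out : Int × Int) : Prop := out = find_leftmost_empty_range_alt blocks_rep min_range_size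
instance (blocks_rep : List Int) (min_range_size : Int) (out : Int × Int) : Decidable (Spec_find_leftmost_empty_range blocks_rep min_range_size out) := by unfold Spec_find_leftmost_empty_range; infer_instance

-- ===== CLAIM (what is proved, stated in full; the proofs are below) =====
def Claim_equal_find_leftmost_empty_range : Prop := ∀ (blocks_rep : List Int) (min_range_size : Int), Dom_find_leftmost_empty_range blocks_rep min_range_size → Pre_find_leftmost_empty_range blocks_rep min_range_size → Spec_find_leftmost_empty_range blocks_rep min_range_size (find_leftmost_empty_range blocks_rep min_range_size)

-- ===== LEMMAS AND PROOFS =====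

-- the reference notion both ports are reduced to: the leftmost index j such that a block
-- of n consecutive POINT_REPs starts at j
def firstWin (n : Nat) : List Int → Option Nat
  | [] => if n = 0 then some 0 else none
  | x :: xs =>
    if (List.replicate n (-1 : Int)).isPrefixOf (x :: xs) then some 0
    else (firstWin n xs).map (· + 1)

theorem replicate_prefix_replicate_iff (n k : Nat) (c : Int) :
    List.replicate n c <+: List.replicate k c ↔ n ≤ k := by
  constructor
  · intro h
    have := h.length_le
    simpa using this
  · intro h
    rw [List.prefix_iff_eq_take]
    simp [List.take_replicate, Nat.min_eq_left h]

theorem not_prefix_through (rs k : Nat) (hrs : rs < k) (x : Int) (hx : x ≠ -1) (xs : List Int) :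
    ¬ List.replicate k (-1 : Int) <+: List.replicate rs (-1 : Int) ++ x :: xs := by
  induction rs generalizing k with
  | zero =>
    cases k with
    | zero => omega
    | succ k =>
      intro h
      simp only [List.replicate_zero, List.nil_append, List.replicate_succ,
        List.cons_prefix_cons] at h
      exact hx h.1.symm
  | succ rs ih =>
    cases k with
    | zero => omega
    | succ k =>
      intro h
      simp only [List.replicate_succ, List.cons_append, List.cons_prefix_cons] at h
      exact ih k (by omega) h.2

-- firstWin over a pure pad shorter than the pattern finds nothing
theorem firstWin_pad (n rs : Nat) (h : rs < n) :
    firstWin n (List.replicate rs (-1 : Int)) = none := by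
  induction rs with
  | zero => simp [firstWin]; omega
  | succ rs ih =>
    rw [List.replicate_succ, firstWin]
    have hnp : ¬ (List.replicate n (-1 : Int)).isPrefixOf
        ((-1 : Int) :: List.replicate rs (-1 : Int)) = true := by
      intro hpre
      have hpre' := List.isPrefixOf_iff_prefix.mp hpre
      rw [← List.replicate_succ] at hpre'
      have := (replicate_prefix_replicate_iff n (rs + 1) (-1)).mp hpre'
      omega
    rw [if_neg hnp, ih (by omega)]
    rfl

-- firstWin skips a pad followed by a non-(-1) element entirely
theorem firstWin_skip (n rs : Nat) (h : rs < n) (x : Int) (hx : x ≠ -1) (xs : List Int) :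
    firstWin n (List.replicate rs (-1 : Int) ++ x :: xs) =
      (firstWin n xs).map (· + (rs + 1)) := by
  induction rs generalizing n with
  | zero =>
    simp only [List.replicate_zero, List.nil_append]
    rw [firstWin]
    have hnp : ¬ (List.replicate n (-1 : Int)).isPrefixOf (x :: xs) = true := by
      intro hpre
      have := not_prefix_through 0 n h x hx xs
      simp only [List.replicate_zero, List.nil_append] at this
      exact this (List.isPrefixOf_iff_prefix.mp hpre)
    rw [if_neg hnp]
  | succ rs ih =>
    rw [List.replicate_succ, List.cons_append, firstWin]
    have hnp : ¬ (List.replicate n (-1 : Int)).isPrefixOf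
        ((-1 : Int) :: (List.replicate rs (-1 : Int) ++ x :: xs)) = true := by
      intro hpre
      have := not_prefix_through (rs + 1) n h x hx xs
      rw [List.replicate_succ, List.cons_append] at this
      exact this (List.isPrefixOf_iff_prefix.mp hpre)
    rw [if_neg hnp, ih n (by omega)]
    cases firstWin n xs <;> simp <;> omega

-- A's loop computes firstWin of the input padded with its incoming counter
theorem findLoopA_firstWin (m : Int) (hm : 1 ≤ m) :
    ∀ (l : List Int) (rs : Nat) (i : Int), (rs : Int) < m →
    findLoopA l m i rs =
      match firstWin m.toNat (List.replicate rs (-1 : Int) ++ l) with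
      | some j => (i - rs + j, i - rs + j + m)
      | none => (-1, -1) := by
  intro l
  induction l with
  | nil =>
    intro rs i hrs
    rw [List.append_nil, firstWin_pad m.toNat rs (by omega)]
    rfl
  | cons x xs ih =>
    intro rs i hrs
    by_cases hx : x = -1
    · subst hx
      have hpadd : List.replicate rs (-1 : Int) ++ (-1 : Int) :: xs =
          List.replicate (rs + 1) (-1 : Int) ++ xs := by
        rw [List.replicate_succ', List.append_assoc]; rfl
      rw [findLoopA]
      simp only [reduceIte]
      by_cases hfit : m ≤ (rs : Int) + 1
      · have hmeq : m = (rs : Int) + 1 := by omega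
        have hpre : (List.replicate m.toNat (-1 : Int)).isPrefixOf
            ((-1 : Int) :: (List.replicate rs (-1 : Int) ++ xs)) = true := by
          refine List.isPrefixOf_iff_prefix.mpr ?_
          rw [show (-1 : Int) :: (List.replicate rs (-1 : Int) ++ xs) =
              List.replicate (rs + 1) (-1 : Int) ++ xs by
            rw [List.replicate_succ, List.cons_append]]
          have hmt : m.toNat = rs + 1 := by omega
          rw [hmt]
          exact List.prefix_append _ _
        rw [if_pos hfit, hpadd, List.replicate_succ, List.cons_append, firstWin, if_pos hpre]
        simp only [Nat.cast_zero, add_zero, Prod.mk.injEq]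
        constructor <;> omega
      · rw [if_neg hfit]
        have h1 := ih (rs + 1) (i + 1) (by push_cast; omega)
        push_cast at h1
        rw [h1, hpadd]
        cases firstWin m.toNat (List.replicate (rs + 1) (-1 : Int) ++ xs) with
        | none => rfl
        | some j => simp only [Prod.mk.injEq]; push_cast; constructor <;> omega
    · rw [findLoopA]
      simp only [if_neg hx]
      rw [if_neg (by omega)]
      have h0 := ih 0 (i + 1) (by push_cast; omega)
      simp only [Nat.cast_zero, List.replicate_zero, List.nil_append, sub_zero] at h0
      rw [h0, firstWin_skip m.toNat rs (by omega) x hx xs]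
      cases firstWin m.toNat xs with
      | none => rfl
      | some j => simp only [Option.map_some, Prod.mk.injEq]; push_cast; constructor <;> omega

-- soundness of firstWin: it points at a window, and at the first one
theorem firstWin_some (n : Nat) (l : List Int) (j : Nat) (h : firstWin n l = some j) :
    List.replicate n (-1 : Int) <+: l.drop j ∧
      ∀ i < j, ¬ List.replicate n (-1 : Int) <+: l.drop i := by
  induction l generalizing j with
  | nil =>
    rw [firstWin] at h
    split_ifs at h with hn
    · injection h with h
      subst h; subst hn
      exact ⟨by simp, by omega⟩
  | cons x xs ih =>
    rw [firstWin] at h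
    split_ifs at h with hpre
    · injection h with h
      subst h
      exact ⟨List.isPrefixOf_iff_prefix.mp hpre, by omega⟩
    · rw [Option.map_eq_some_iff] at h
      obtain ⟨j', hfw, rfl⟩ := h
      obtain ⟨h1, h2⟩ := ih j' hfw
      refine ⟨by simpa using h1, ?_⟩
      intro i hi
      cases i with
      | zero =>
        intro hc
        exact hpre (List.isPrefixOf_iff_prefix.mpr hc)
      | succ i' =>
        simpa using h2 i' (by omega)

theorem firstWin_none (n : Nat) (l : List Int) (h : firstWin n l = none) :
    ∀ j, ¬ List.replicate n (-1 : Int) <+: l.drop j := by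
  induction l with
  | nil =>
    rw [firstWin] at h
    split_ifs at h with hn
    intro j hc
    have := hc.length_le
    simp at this
    omega
  | cons x xs ih =>
    rw [firstWin] at h
    split_ifs at h with hpre
    rw [Option.map_eq_none_iff] at h
    intro j
    cases j with
    | zero =>
      intro hc
      exact hpre (List.isPrefixOf_iff_prefix.mpr hc)
    | succ j' =>
      simpa using ih h j'

-- the mask encodes windows faithfully: a block of n 'E's sits at a place of the mask
-- exactly where a block of n POINT_REPs sits in the list
theorem replicate_E_prefix_iff (n : Nat) (q : List Int) :
    List.replicate n 'E' <+: q.map (fun b => if b = -1 then 'E' else 'F') ↔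
      List.replicate n (-1 : Int) <+: q := by
  induction n generalizing q with
  | zero => simp
  | succ n ih =>
    cases q with
    | nil =>
      simp only [List.replicate_succ, List.map_nil]
      constructor <;> (intro h; exact absurd h.length_le (by simp))
    | cons x xs =>
      simp only [List.replicate_succ, List.map_cons, List.cons_prefix_cons]
      rw [ih]
      constructor
      · rintro ⟨h1, h2⟩
        refine ⟨?_, h2⟩
        by_cases hx : x = -1
        · exact hx.symm
        · rw [if_neg hx] at h1
          simp at h1
      · rintro ⟨h1, h2⟩
        exact ⟨by rw [if_pos h1.symm], h2⟩

-- B's find equals firstWin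
theorem find_eq_firstWin (n : Nat) (l : List Int) :
    PySem.Chars.find (l.map (fun b => if b = -1 then 'E' else 'F')) (List.replicate n 'E') =
      match firstWin n l with
      | some j => (j : Int)
      | none => -1 := by
  set mask := l.map (fun b => if b = -1 then 'E' else 'F') with hmask
  set pat := List.replicate n 'E' with hpat
  cases hfw : firstWin n l with
  | none =>
    rw [PySem.Chars.find_eq_neg_one_iff]
    intro hinf
    have hin : PySem.Chars.isIn pat mask = true := (PySem.Chars.isIn_iff_infix _ _).mpr hinf
    obtain ⟨j, hj⟩ := (PySem.Chars.exists_prefix_drop_iff_isIn _ _).mpr hin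
    rw [hmask, ← List.map_drop, hpat, replicate_E_prefix_iff] at hj
    exact firstWin_none n l hfw j hj
  | some j =>
    obtain ⟨h1, h2⟩ := firstWin_some n l j hfw
    have hj' : pat <+: mask.drop j := by
      rw [hmask, ← List.map_drop, hpat, replicate_E_prefix_iff]
      exact h1
    have hinf : pat <:+: mask := by
      rw [← PySem.Chars.isIn_iff_infix, ← PySem.Chars.exists_prefix_drop_iff_isIn]
      exact ⟨j, hj'⟩
    have hpos : 0 ≤ PySem.Chars.find mask pat := (PySem.Chars.find_nonneg_iff _ _).mpr hinf
    obtain ⟨hf1, hf2⟩ := PySem.Chars.find_spec (s := mask) (sub := pat) hpos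
    have hfj : (PySem.Chars.find mask pat).toNat = j := by
      by_contra hne
      rcases Nat.lt_or_ge (PySem.Chars.find mask pat).toNat j with hlt | hge
      · have hbad := h2 _ hlt
        rw [← replicate_E_prefix_iff, ← hpat, List.map_drop, ← hmask] at hbad
        exact hbad hf1
      · exact hf2 j (by omega) hj'
    show PySem.Chars.find mask pat = (j : Int)
    omega

-- ===== VERDICT (by name: the statement is the Claim_ definition above) =====
theorem find_leftmost_empty_range_spec : Claim_equal_find_leftmost_empty_range := by
  intro blocks m _ hmpre
  have hm : 1 ≤ m := hmpre
  unfold Spec_find_leftmost_empty_range find_leftmost_empty_range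
  simp only [find_leftmost_empty_range_alt]
  have hA := findLoopA_firstWin m hm blocks 0 0 (by push_cast; omega)
  simp only [List.replicate_zero, List.nil_append, Nat.cast_zero, sub_zero, zero_add] at hA
  rw [hA]
  by_cases hbig : (blocks.length : Int) < m
  · rw [if_pos hbig]
    cases hfw : firstWin m.toNat blocks with
    | none => rfl
    | some j =>
      exfalso
      have h1 := (firstWin_some m.toNat blocks j hfw).1
      have h2 := h1.length_le
      simp only [List.length_replicate, List.length_drop] at h2
      omega
  rw [if_neg hbig]
  have hfind : PySem.Str.find (String.ofList (blocks.map (fun b => if b = -1 then 'E' else 'F')))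
      (String.ofList (List.replicate m.toNat 'E')) =
      match firstWin m.toNat blocks with
      | some j => (j : Int)
      | none => -1 := by
    rw [PySem.Str.find_eq]
    simpa using find_eq_firstWin m.toNat blocks
  rw [hfind]
  cases firstWin m.toNat blocks with
  | none => simp
  | some j =>
    have hne : ¬ ((j : Int) = -1) := by omega
    simp only [if_neg hne]
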